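-- pv_equiv track=rewrite | github.com/CidQueiroz/hunterteck | services/lead_extractor/person_finder.py | _calcular_nivel
-- ===== SOURCE A (Python) =====
-- def _calcular_nivel(cargo: str) -> int:
--     """Calcula nível hierárquico do cargo."""
--     cargo_lower = cargo.lower()
--
--     if any(t in cargo_lower for t in ['ceo', 'cto', 'cfo', 'founder']):
--         return 0
--     elif any(t in cargo_lower for t in ['diretor', 'vice', 'presidente']):
--         return 1
--     elif any(t in cargo_lower for t in ['gerente', 'senhor', 'coordenador']):
--         return 2
--     else:
--         return 3
-- ===== SOURCE B (Python) =====
-- # Single left-to-right scan over the text: at each position, a first-character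
-- # dispatch table proposes the few keywords that could start there; startswith
-- # confirms; a running minimum accumulates the best (lowest) level, default 3.
-- _KW = {
--     'c': (('ceo', 0), ('cto', 0), ('cfo', 0), ('coordenador', 2)),
--     'f': (('founder', 0),),
--     'd': (('diretor', 1),),
--     'v': (('vice', 1),),
--     'p': (('presidente', 1),),
--     'g': (('gerente', 2),),
--     's': (('senhor', 2),),
-- }
--
--
-- def _calcular_nivel(cargo: str) -> int:
--     """Calcula nível hierárquico do cargo."""
--     s = cargo.lower()
--     best = 3
--     for i, ch in enumerate(s):
--         for kw, lvl in _KW.get(ch, ()):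
--             if s.startswith(kw, i):
--                 best = min(best, lvl)
--     return best
-- ===== Notes on version B (the rewrite author's own statement) =====
-- stated objective: alternative
-- what changed: Replaced the keyword-major if/elif cascade of substring tests by a position-major multi-pattern scan: one pass over the lowered text, a first-character dispatch table proposing candidate keywords at each position, startswith confirming, and a running minimum level (default 3).
import Mathlib
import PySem

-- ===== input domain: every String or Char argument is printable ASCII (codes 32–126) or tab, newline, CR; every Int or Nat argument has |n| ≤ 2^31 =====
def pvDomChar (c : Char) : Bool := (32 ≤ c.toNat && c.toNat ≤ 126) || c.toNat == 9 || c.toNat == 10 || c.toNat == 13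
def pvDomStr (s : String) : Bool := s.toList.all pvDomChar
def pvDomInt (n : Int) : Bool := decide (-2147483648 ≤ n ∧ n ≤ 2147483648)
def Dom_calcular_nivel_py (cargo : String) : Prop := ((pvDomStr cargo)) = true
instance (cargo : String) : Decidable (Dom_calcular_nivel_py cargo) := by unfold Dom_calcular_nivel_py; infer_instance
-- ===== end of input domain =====

-- B replaces A's keyword-major if/elif cascade of substring tests by one
-- position-major scan of the lowered text with a first-character dispatch
-- table and a running minimum level (objective: alternative).

-- ===== PORT A =====
def calcular_nivel_py (cargo : String) : Int :=
  let cargo_lower := PySem.Str.lower cargo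
  if (["ceo", "cto", "cfo", "founder"].any fun t => PySem.Str.isIn t cargo_lower) then 0
  else if (["diretor", "vice", "presidente"].any fun t => PySem.Str.isIn t cargo_lower) then 1
  else if (["gerente", "senhor", "coordenador"].any fun t => PySem.Str.isIn t cargo_lower) then 2
  else 3

-- ===== PORT B =====
-- the _KW dict of Source B: first character ↦ candidate (keyword, level) pairs
def pvDispatch (ch : Char) : List (String × Int) :=
  if ch = 'c' then [("ceo", 0), ("cto", 0), ("cfo", 0), ("coordenador", 2)]
  else if ch = 'f' then [("founder", 0)]
  else if ch = 'd' then [("diretor", 1)]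
  else if ch = 'v' then [("vice", 1)]
  else if ch = 'p' then [("presidente", 1)]
  else if ch = 'g' then [("gerente", 2)]
  else if ch = 's' then [("senhor", 2)]
  else []

-- inner loop: each candidate keyword that starts at this position lowers `best`
def pvInner (best : Int) (suffix : List Char) (ch : Char) : Int :=
  (pvDispatch ch).foldl
    (fun b p => if PySem.Chars.startswith suffix p.1.toList then min b p.2 else b) best

-- outer loop over positions, as structural recursion over the suffixes of s
def pvScan : Int → List Char → Int
  | best, [] => best
  | best, ch :: rest => pvScan (pvInner best (ch :: rest) ch) rest

def calcular_nivel_py_alt (cargo : String) : Int :=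
  pvScan 3 (PySem.Str.lower cargo).toList

-- ===== PRECONDITION & SPEC =====
def Spec_calcular_nivel_py (cargo : String) (out : Int) : Prop := out = calcular_nivel_py_alt cargo
instance (cargo : String) (out : Int) : Decidable (Spec_calcular_nivel_py cargo out) := by unfold Spec_calcular_nivel_py; infer_instance

-- ===== CLAIM (what is proved, stated in full; the proofs are below) =====
def Claim_equal_calcular_nivel_py : Prop := ∀ (cargo : String), Dom_calcular_nivel_py cargo → Spec_calcular_nivel_py cargo (calcular_nivel_py cargo)

-- ===== LEMMAS AND PROOFS =====

-- the ten (keyword, level) pairs in one flat list (dispatch lists concatenated)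
def pvTable : List (String × Int) :=
  [("ceo", 0), ("cto", 0), ("cfo", 0), ("coordenador", 2), ("founder", 0),
   ("diretor", 1), ("vice", 1), ("presidente", 1), ("gerente", 2), ("senhor", 2)]

-- conditional min-fold over a keyword table
def pvFold (f : String × Int → Bool) (ps : List (String × Int)) (b : Int) : Int :=
  ps.foldl (fun b p => if f p then min b p.2 else b) b

theorem pvFold_cons (f : String × Int → Bool) (p : String × Int)
    (ps : List (String × Int)) (b : Int) :
    pvFold f (p :: ps) b = pvFold f ps (if f p then min b p.2 else b) := rfl

theorem pvFold_min (f : String × Int → Bool) (ps : List (String × Int)) (x y : Int) :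
    pvFold f ps (min x y) = min x (pvFold f ps y) := by
  induction ps generalizing y with
  | nil => rfl
  | cons p rest ih =>
      rw [pvFold_cons, pvFold_cons]
      by_cases h : f p
      · simp only [if_pos h]
        rw [min_assoc, ih]
      · simp only [if_neg h, ih]

theorem pvFold_or (f g : String × Int → Bool) (ps : List (String × Int)) (b : Int) :
    pvFold (fun p => f p || g p) ps b = pvFold g ps (pvFold f ps b) := by
  induction ps generalizing b with
  | nil => rfl
  | cons p rest ih =>
      rw [pvFold_cons (fun p => f p || g p), pvFold_cons g, pvFold_cons f]
      cases hf : f p <;> cases hg : g p <;> simp [hf, hg]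
      · -- neither fires: both sides are the plain folds
        exact ih b
      · -- g only: push p.2 into the initial accumulator of the f-fold
        rw [ih]
        congr 1
        rw [min_comm b p.2, pvFold_min, min_comm p.2]
      · -- f only
        rw [ih]
      · -- both: pull the outer min through the f-fold, absorb the duplicate
        rw [ih, min_comm b p.2, pvFold_min]
        congr 1
        omega

-- .toList of the keyword literals
theorem pv_tl1 : ("ceo" : String).toList = ['c','e','o'] := rfl
theorem pv_tl2 : ("cto" : String).toList = ['c','t','o'] := rfl
theorem pv_tl3 : ("cfo" : String).toList = ['c','f','o'] := rfl
theorem pv_tl4 : ("coordenador" : String).toList = ['c','o','o','r','d','e','n','a','d','o','r'] := rfl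
theorem pv_tl5 : ("founder" : String).toList = ['f','o','u','n','d','e','r'] := rfl
theorem pv_tl6 : ("diretor" : String).toList = ['d','i','r','e','t','o','r'] := rfl
theorem pv_tl7 : ("vice" : String).toList = ['v','i','c','e'] := rfl
theorem pv_tl8 : ("presidente" : String).toList = ['p','r','e','s','i','d','e','n','t','e'] := rfl
theorem pv_tl9 : ("gerente" : String).toList = ['g','e','r','e','n','t','e'] := rfl
theorem pv_tl10 : ("senhor" : String).toList = ['s','e','n','h','o','r'] := rfl

-- a keyword whose first character differs cannot start at this position
theorem pv_npfx (ch c : Char) (u t : List Char) (hc : c ≠ ch) :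
    PySem.Chars.startswith (ch :: t) (c :: u) = false := by
  rw [Bool.eq_false_iff]
  intro h
  rcases (PySem.Chars.startswith_iff _ _).1 h with ⟨v, hv⟩
  rw [List.cons_append, List.cons.injEq] at hv
  exact hc hv.1

-- the dispatch-based inner loop equals the full-table prefix fold
theorem pvInner_eq_table (best : Int) (ch : Char) (t : List Char) :
    pvInner best (ch :: t) ch
      = pvFold (fun p => PySem.Chars.startswith (ch :: t) p.1.toList) pvTable best := by
  by_cases h1 : ch = 'c'
  · subst h1
    simp [pvInner, pvDispatch, pvFold, pvTable,
      pv_tl1, pv_tl2, pv_tl3, pv_tl4, pv_tl5, pv_tl6, pv_tl7, pv_tl8, pv_tl9, pv_tl10, pv_npfx]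
  · by_cases h2 : ch = 'f'
    · subst h2
      simp [pvInner, pvDispatch, pvFold, pvTable,
        pv_tl1, pv_tl2, pv_tl3, pv_tl4, pv_tl5, pv_tl6, pv_tl7, pv_tl8, pv_tl9, pv_tl10, pv_npfx]
    · by_cases h3 : ch = 'd'
      · subst h3
        simp [pvInner, pvDispatch, pvFold, pvTable,
          pv_tl1, pv_tl2, pv_tl3, pv_tl4, pv_tl5, pv_tl6, pv_tl7, pv_tl8, pv_tl9, pv_tl10, pv_npfx]
      · by_cases h4 : ch = 'v'
        · subst h4
          simp [pvInner, pvDispatch, pvFold, pvTable,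
            pv_tl1, pv_tl2, pv_tl3, pv_tl4, pv_tl5, pv_tl6, pv_tl7, pv_tl8, pv_tl9, pv_tl10, pv_npfx]
        · by_cases h5 : ch = 'p'
          · subst h5
            simp [pvInner, pvDispatch, pvFold, pvTable,
              pv_tl1, pv_tl2, pv_tl3, pv_tl4, pv_tl5, pv_tl6, pv_tl7, pv_tl8, pv_tl9, pv_tl10, pv_npfx]
          · by_cases h6 : ch = 'g'
            · subst h6
              simp [pvInner, pvDispatch, pvFold, pvTable,
                pv_tl1, pv_tl2, pv_tl3, pv_tl4, pv_tl5, pv_tl6, pv_tl7, pv_tl8, pv_tl9, pv_tl10, pv_npfx]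
            · by_cases h7 : ch = 's'
              · subst h7
                simp [pvInner, pvDispatch, pvFold, pvTable,
                  pv_tl1, pv_tl2, pv_tl3, pv_tl4, pv_tl5, pv_tl6, pv_tl7, pv_tl8, pv_tl9, pv_tl10, pv_npfx]
              · simp [pvInner, pvDispatch, pvFold, pvTable, h1, h2, h3, h4, h5, h6, h7,
                  Ne.symm h1, Ne.symm h2, Ne.symm h3, Ne.symm h4, Ne.symm h5, Ne.symm h6, Ne.symm h7,
                  pv_tl1, pv_tl2, pv_tl3, pv_tl4, pv_tl5, pv_tl6, pv_tl7, pv_tl8, pv_tl9, pv_tl10, pv_npfx]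

-- keyword occurs in ch::t iff it starts there or occurs in t (Bool form)
theorem pvIsIn_cons (kw : List Char) (ch : Char) (t : List Char) :
    PySem.Chars.isIn kw (ch :: t)
      = (PySem.Chars.startswith (ch :: t) kw || PySem.Chars.isIn kw t) := by
  rw [Bool.eq_iff_iff]
  simp only [Bool.or_eq_true, PySem.Chars.isIn_iff_infix, PySem.Chars.startswith_iff]
  exact List.infix_cons_iff

-- a nonempty keyword does not occur in the empty text
theorem pvIsIn_nil (c : Char) (u : List Char) : PySem.Chars.isIn (c :: u) [] = false := by
  rw [PySem.Chars.isIn_eq_false_iff]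
  rintro ⟨s, t, h⟩
  simp at h

-- the scan computes the conditional min-fold of the isIn tests over the table
theorem pvScan_eq (s : List Char) (best : Int) :
    pvScan best s = pvFold (fun p => PySem.Chars.isIn p.1.toList s) pvTable best := by
  induction s generalizing best with
  | nil =>
      simp [pvScan, pvFold, pvTable, pvIsIn_nil,
        pv_tl1, pv_tl2, pv_tl3, pv_tl4, pv_tl5, pv_tl6, pv_tl7, pv_tl8, pv_tl9, pv_tl10]
  | cons ch t ih =>
      have hfun : (fun p : String × Int => PySem.Chars.isIn p.1.toList (ch :: t))
          = fun p => PySem.Chars.startswith (ch :: t) p.1.toList || PySem.Chars.isIn p.1.toList t := by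
        funext p; exact pvIsIn_cons _ _ _
      rw [pvScan, ih, hfun, pvFold_or, pvInner_eq_table]

-- A's cascade over the ten isIn Booleans equals the table min-fold (all cases)
theorem pv_cascade_fold (b1 b2 b3 b4 b5 b6 b7 b8 b9 b10 : Bool) :
    (if b1 || (b2 || (b3 || (b4 || false))) then (0 : Int)
     else if b5 || (b6 || (b7 || false)) then 1
     else if b8 || (b9 || (b10 || false)) then 2
     else 3)
    = (let s1 := if b1 then min 3 0 else (3 : Int)
       let s2 := if b2 then min s1 0 else s1
       let s3 := if b3 then min s2 0 else s2
       let s4 := if b10 then min s3 2 else s3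
       let s5 := if b4 then min s4 0 else s4
       let s6 := if b5 then min s5 1 else s5
       let s7 := if b6 then min s6 1 else s6
       let s8 := if b7 then min s7 1 else s7
       let s9 := if b8 then min s8 2 else s8
       if b9 then min s9 2 else s9) := by
  revert b1 b2 b3 b4 b5 b6 b7 b8 b9 b10
  decide

-- ===== VERDICT (by name: the statement is the Claim_ definition above) =====
theorem calcular_nivel_py_spec : Claim_equal_calcular_nivel_py := by
  intro cargo _
  unfold Spec_calcular_nivel_py calcular_nivel_py calcular_nivel_py_alt
  rw [pvScan_eq]
  simp only [List.any_cons, List.any_nil, PySem.Str.isIn_eq, pvFold, pvTable, List.foldl]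
  exact pv_cascade_fold _ _ _ _ _ _ _ _ _ _
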